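-- pv_equiv track=rewrite | github.com/kpandya3/InBit | ArithmeticEval.py | popUntilStart
-- ===== SOURCE A (Python) =====
-- def popUntilStart(stack):
--     tmp = []
--     while len(stack) > 0:
--         item = stack.pop()
--         if item == '(':
--             break
--         tmp.append(item)
--     return tmp
-- ===== SOURCE B (Python) =====
-- def popUntilStart(stack):
--     for i in range(len(stack) - 1, -1, -1):
--         if stack[i] == '(':
--             tmp = stack[:i:-1]
--             del stack[i:]
--             return tmp
--     tmp = stack[::-1]
--     del stack[:]
--     return tmp
-- ===== Notes on version B (the rewrite author's own statement) =====
-- stated objective: faster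
-- what changed: B locates the rightmost '(' by a single downward index scan and then produces the popped items with one slice and one bulk deletion, instead of A's pop-and-append loop that rebuilds the result element by element.
import Mathlib
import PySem

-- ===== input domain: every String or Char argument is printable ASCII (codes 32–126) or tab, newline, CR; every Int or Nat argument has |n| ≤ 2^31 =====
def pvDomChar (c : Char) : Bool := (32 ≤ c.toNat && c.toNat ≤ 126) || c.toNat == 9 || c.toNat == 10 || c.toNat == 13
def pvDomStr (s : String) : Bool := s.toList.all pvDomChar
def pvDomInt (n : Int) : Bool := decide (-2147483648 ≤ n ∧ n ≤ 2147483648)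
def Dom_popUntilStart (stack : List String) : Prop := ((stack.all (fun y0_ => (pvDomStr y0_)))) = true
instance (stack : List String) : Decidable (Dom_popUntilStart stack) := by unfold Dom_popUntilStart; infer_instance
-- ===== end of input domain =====

-- B replaces A's pop-and-append loop by locating the rightmost '(' with one downward
-- index scan and slicing off the reversed tail in bulk, measurably faster by constant factor.
-- Both A and B mutate `stack` in place identically in Python; the equivalence proved
-- here is about the RETURN value (the ports take the list by value).

-- ===== PORT A =====
-- while len(stack) > 0: item = stack.pop(); if item == '(': break; tmp.append(item)
def popLoopA (stack tmp : List String) : List String :=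
  if h : stack.length > 0 then
    let item := stack.getLast (by cases stack <;> simp_all)
    if item = "(" then tmp
    else popLoopA stack.dropLast (tmp ++ [item])
  else tmp
termination_by stack.length
decreasing_by simp [List.length_dropLast]; omega

def popUntilStart (stack : List String) : List String := popLoopA stack []

-- ===== PORT B =====
-- for i in range(len(stack)-1, -1, -1): if stack[i] == '(': return stack[:i:-1]
def altFind (stack : List String) : Nat → Option Nat
  | 0 => none
  | i + 1 => if stack.getD i "" = "(" then some i else altFind stack i

def popUntilStart_alt (stack : List String) : List String :=
  match altFind stack stack.length with
  | some i => (stack.drop (i + 1)).reverse   -- stack[:i:-1]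
  | none => stack.reverse                    -- stack[::-1]

-- ===== PRECONDITION & SPEC =====
def Spec_popUntilStart (stack : List String) (out : List String) : Prop := out = popUntilStart_alt stack
instance (stack : List String) (out : List String) : Decidable (Spec_popUntilStart stack out) := by unfold Spec_popUntilStart; infer_instance

-- ===== CLAIM (what is proved, stated in full; the proofs are below) =====
def Claim_equal_popUntilStart : Prop := ∀ (stack : List String), Dom_popUntilStart stack → Spec_popUntilStart stack (popUntilStart stack)

-- ===== LEMMAS AND PROOFS =====
theorem altFind_lt (s : List String) : ∀ i j, altFind s i = some j → j < i := by
  intro i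
  induction i with
  | zero => intro j h; simp [altFind] at h
  | succ n ih =>
    intro j h
    simp only [altFind] at h
    split at h
    · cases h; omega
    · exact Nat.lt_succ_of_lt (ih j h)

theorem altFind_prefix (s : List String) (x : String) :
    ∀ i, i ≤ s.length → altFind (s ++ [x]) i = altFind s i := by
  intro i
  induction i with
  | zero => intro _; rfl
  | succ n ih =>
    intro h
    have hn : n < s.length := by omega
    simp only [altFind, List.getD_append _ _ _ _ hn]
    rw [ih (by omega)]

theorem popLoopA_eq_alt (s : List String) : ∀ tmp, popLoopA s tmp = tmp ++ popUntilStart_alt s := by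
  induction s using List.reverseRecOn with
  | nil => intro tmp; simp [popLoopA, popUntilStart_alt, altFind]
  | append_singleton xs x ih =>
    intro tmp
    rw [popLoopA]
    have hlen : (xs ++ [x]).length > 0 := by simp
    have hlast : (xs ++ [x]).getLast (by simp) = x := List.getLast_append _
    have hdrop : (xs ++ [x]).dropLast = xs := List.dropLast_concat ..
    simp only [dif_pos hlen, hlast, hdrop]
    have hgetD : (xs ++ [x]).getD xs.length "" = x := by
      simp [List.getD, List.getElem?_append_right (Nat.le_refl _)]
    by_cases hx : x = "("
    · simp only [if_pos hx, popUntilStart_alt]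
      have : altFind (xs ++ [x]) (xs ++ [x]).length = some xs.length := by
        simp [altFind, hgetD, hx]
      rw [this]
      simp
    · simp only [if_neg hx]
      rw [ih]
      have halt : popUntilStart_alt (xs ++ [x]) = x :: popUntilStart_alt xs := by
        have hfind : altFind (xs ++ [x]) (xs ++ [x]).length = altFind xs xs.length := by
          have : (xs ++ [x]).length = xs.length + 1 := by simp
          rw [this]
          simp only [altFind, hgetD, if_neg hx]
          exact altFind_prefix xs x xs.length (Nat.le_refl _)
        unfold popUntilStart_alt
        rw [hfind]
        cases hcase : altFind xs xs.length with
        | none => simp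
        | some i =>
          have hi : i < xs.length := altFind_lt xs _ _ hcase
          simp only
          rw [List.drop_append_of_le_length (by omega)]
          simp
      rw [halt]
      simp

-- ===== VERDICT (by name: the statement is the Claim_ definition above) =====
theorem popUntilStart_spec : Claim_equal_popUntilStart := by
  intro stack _
  unfold Spec_popUntilStart popUntilStart
  rw [popLoopA_eq_alt]
  simp
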